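-- pv_equiv track=rewrite | github.com/elubandisrivyshnavi-cpu/python | project 2.py | collect_instructions
-- ===== SOURCE A (Python) =====
-- def collect_instructions(lines, start_index, count):
--     instr = []
--     i = start_index
--     while i < len(lines) and len(instr) < count:
--         if lines[i].strip() != "":
--             instr.append(lines[i])
--         i += 1
--     return instr, i
-- ===== SOURCE B (Python) =====
-- def collect_instructions(lines, start_index, count):
--     if count <= 0 or start_index >= len(lines):
--         return [], start_index
--     positions = [j for j in range(start_index, len(lines)) if lines[j].strip() != ""]
--     chosen = positions[:count]
--     instr = [lines[j] for j in chosen]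
--     i = chosen[-1] + 1 if len(chosen) == count else len(lines)
--     return instr, i
-- ===== Notes on version B (the rewrite author's own statement) =====
-- stated objective: alternative
-- what changed: Replaces A's stateful while-loop (mutating i and instr together) with a filter-then-take decomposition: build the list of non-blank positions once, take the first count, map them to lines, and derive the stop index from the last chosen position (or len(lines)).
import Mathlib
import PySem

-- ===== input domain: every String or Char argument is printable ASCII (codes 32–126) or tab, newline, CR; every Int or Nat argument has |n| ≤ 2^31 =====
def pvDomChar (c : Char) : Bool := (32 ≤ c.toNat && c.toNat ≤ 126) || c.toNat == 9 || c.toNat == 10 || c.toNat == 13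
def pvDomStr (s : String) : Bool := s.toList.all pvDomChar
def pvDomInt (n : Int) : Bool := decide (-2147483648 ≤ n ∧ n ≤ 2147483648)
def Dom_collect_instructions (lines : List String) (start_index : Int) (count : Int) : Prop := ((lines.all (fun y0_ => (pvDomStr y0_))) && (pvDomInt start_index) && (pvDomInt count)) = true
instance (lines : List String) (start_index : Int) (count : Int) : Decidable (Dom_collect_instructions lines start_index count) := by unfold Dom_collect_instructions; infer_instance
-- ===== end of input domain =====

-- B replaces A's stateful while-loop by a filter-then-take decomposition (same cost); return values proved equal on Pre_.

-- ===== PORT A =====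
-- the while-loop of A, step for step: guard, optional append, i += 1
def collectGo (lines : List String) (count : Int) (i : Int) (instr : List String) : List String × Int :=
  if _h : i < (lines.length : Int) ∧ (instr.length : Int) < count then
    collectGo lines count (i + 1)
      (if PySem.Str.strip (PySem.List.pyGetD lines i "") != "" then instr ++ [PySem.List.pyGetD lines i ""] else instr)
  else (instr, i)
  termination_by ((lines.length : Int) - i).toNat
  decreasing_by omega

def collect_instructions (lines : List String) (start_index : Int) (count : Int) : List String × Int :=
  collectGo lines count start_index []

-- ===== PORT B =====
def collect_instructions_alt (lines : List String) (start_index : Int) (count : Int) : List String × Int :=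
  if count ≤ 0 ∨ (lines.length : Int) ≤ start_index then ([], start_index)
  else
    let positions := (PySem.List.pyRange start_index lines.length 1).filter
      (fun j => PySem.Str.strip (PySem.List.pyGetD lines j "") != "")
    let chosen := positions.take count.toNat
    let instr := chosen.map (fun j => PySem.List.pyGetD lines j "")
    let i := if (chosen.length : Int) = count then chosen.getLast?.getD 0 + 1 else (lines.length : Int)
    (instr, i)

-- ===== PRECONDITION & SPEC =====
-- Pre_ excludes exactly the inputs where Python A raises IndexError (count ≥ 1 and start_index < -len(lines)); B raises there too.
def Pre_collect_instructions (lines : List String) (start_index : Int) (count : Int) : Prop :=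
  count ≤ 0 ∨ -(lines.length : Int) ≤ start_index
instance (lines : List String) (start_index : Int) (count : Int) : Decidable (Pre_collect_instructions lines start_index count) := by unfold Pre_collect_instructions; infer_instance
def pvWitness_collect_instructions : List String × Int × Int := (["mov a", "", "add b"], 0, 2)

def Spec_collect_instructions (lines : List String) (start_index : Int) (count : Int) (out : List String × Int) : Prop := out = collect_instructions_alt lines start_index count
instance (lines : List String) (start_index : Int) (count : Int) (out : List String × Int) : Decidable (Spec_collect_instructions lines start_index count out) := by unfold Spec_collect_instructions; infer_instance

-- ===== CLAIM (what is proved, stated in full; the proofs are below) =====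
def Claim_equal_collect_instructions : Prop := ∀ (lines : List String) (start_index : Int) (count : Int), Dom_collect_instructions lines start_index count → Pre_collect_instructions lines start_index count → Spec_collect_instructions lines start_index count (collect_instructions lines start_index count)

-- ===== LEMMAS AND PROOFS =====

theorem collectGo_spec (lines : List String) (count : Int) :
    ∀ (n : Nat) (i : Int) (instr : List String),
    ((lines.length : Int) - i).toNat = n →
    -(lines.length : Int) ≤ i → i ≤ (lines.length : Int) → (instr.length : Int) < count →
    collectGo lines count i instr =
      (let chosen := ((PySem.List.pyRange i lines.length 1).filter
          (fun j => PySem.Str.strip (PySem.List.pyGetD lines j "") != "")).take (count - instr.length).toNat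
       (instr ++ chosen.map (fun j => PySem.List.pyGetD lines j ""),
        if (chosen.length : Int) = count - instr.length then chosen.getLast?.getD 0 + 1
        else (lines.length : Int))) := by
  intro n
  induction n with
  | zero =>
      intro i instr hn hlo hhi hcnt
      have hi : i = (lines.length : Int) := by omega
      rw [collectGo]
      simp [hi, PySem.List.pyRange_one_eq_nil (le_refl _)]
      omega
  | succ n ih =>
      intro i instr hn hlo hhi hcnt
      have hi : i < (lines.length : Int) := by omega
      rw [collectGo]
      rw [dif_pos ⟨hi, hcnt⟩]
      rw [PySem.List.pyRange_one_cons hi]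
      by_cases hb : PySem.Str.strip (PySem.List.pyGetD lines i "") != ""
      · -- line i is non-blank: it is kept
        rw [if_pos hb]
        simp only [List.filter_cons, hb, reduceIte]
        have hk : (count - instr.length).toNat = ((count - (instr.length + 1)).toNat) + 1 := by omega
        rw [hk, List.take_succ_cons]
        by_cases h2 : ((instr.length : Int) + 1) < count
        · -- more lines still wanted
          rw [ih (i + 1) (instr ++ [PySem.List.pyGetD lines i ""]) (by omega) (by omega) (by omega)
              (by simp; omega)]
          simp only [List.length_append, List.length_nil, List.map_cons, List.length_cons,
            Prod.mk.injEq]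
          push_cast
          refine ⟨by simp, ?_⟩
          · 
            set ps := ((PySem.List.pyRange (i+1) lines.length 1).filter
              (fun j => PySem.Str.strip (PySem.List.pyGetD lines j "") != "")) with hps
            set ch := ps.take (count - ((instr.length : Int) + 1)).toNat with hch
            by_cases hlen : (ch.length : Int) = count - ((instr.length : Int) + 1)
            · rw [if_pos hlen, if_pos (by omega)]
              have hne : ch ≠ [] := by
                intro hnil
                rw [hnil] at hlen
                simp at hlen
                omega
              obtain ⟨c0, cs, hcons⟩ := List.exists_cons_of_ne_nil hne
              rw [hcons]
              simp [List.getLast?_cons_cons]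
            · rw [if_neg hlen, if_neg (by omega)]
        · -- this was the last wanted line: loop stops at i + 1
          have hlast : (instr.length : Int) + 1 = count := by omega
          have hk0 : (count - ((instr.length : Int) + 1)).toNat = 0 := by omega
          rw [collectGo]
          rw [dif_neg (by simp; omega)]
          simp [hk0]
          omega
      · -- line i is blank: skipped by both
        rw [if_neg hb]
        simp only [List.filter_cons, hb]
        exact ih (i + 1) instr (by omega) (by omega) (by omega) hcnt

-- ===== VERDICT (by name: the statement is the Claim_ definition above) =====
theorem collect_instructions_spec : Claim_equal_collect_instructions := by
  intro lines start_index count _hdom hpre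
  unfold Spec_collect_instructions collect_instructions collect_instructions_alt
  by_cases htriv : count ≤ 0 ∨ (lines.length : Int) ≤ start_index
  · rw [if_pos htriv]
    rw [collectGo]
    rw [dif_neg (by simp; omega)]
  · rw [if_neg htriv]
    obtain ⟨h1, h2⟩ := not_or.mp htriv
    have hc : 0 < count := by omega
    have hs : start_index < (lines.length : Int) := by omega
    have hlo : -(lines.length : Int) ≤ start_index := by
      rcases hpre with h | h
      · omega
      · exact h
    rw [collectGo_spec lines count ((lines.length : Int) - start_index).toNat start_index [] rfl
        hlo (by omega) (by simp; omega)]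
    simp
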